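-- pv_equiv track=rewrite | github.com/BlueStorminator/puzzle_tools | wordsnips.py | comparecounts
-- ===== SOURCE A (Python) =====
-- def comparecounts(dict1, dict2):
--     """takes 2 dictionaries with letter counts of characters
--     returns 3 dictionaries of letter counts and characters:
--     first = letters in common between the two dicts
--     second = letters unique to the first dict
--     third = letters unique to the second dict"""
--     common = {
--         key: dict1[key] if dict1[key] <= dict2[key] else dict2[key]
--         for key in dict1
--         if key in dict2
--     }
--     uniquea = comp_dict(dict1, common)
--     uniqueb = comp_dict(dict2, common)
--     uniquea = remove_zeroes(uniquea)
--     uniqueb = remove_zeroes(uniqueb)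
--     return common, uniquea, uniqueb
--
-- def comp_dict(sample_dict, common_dict):
--     """
--     returns a new dictionary with unique characters in sample_dict
--     compared to another dictionary
--     """
--     return {
--         key: sample_dict[key] - common_dict[key]
--         if key in common_dict
--         else sample_dict[key]
--         for key in sample_dict
--     }
--
-- def remove_zeroes(dict1):
--     """
--     removes dictionary entries if value = 0
--     """
--     return {key: dict1[key] for key in dict1 if dict1[key] != 0}
-- ===== SOURCE B (Python) =====
-- def comparecounts(dict1, dict2):
--     """Surplus-based reformulation: precompute the signed surplus
--     delta[k] = dict1[k] - dict2[k] on shared keys; no keywise min is taken.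
--     On shared keys: common = dict1[k] minus the positive surplus,
--     uniquea gets the surplus when positive, uniqueb gets its negation when
--     negative; unshared keys go to their unique dict when nonzero."""
--     delta = {k: v - dict2[k] for k, v in dict1.items() if k in dict2}
--     common, uniquea, uniqueb = {}, {}, {}
--     for k, v in dict1.items():
--         if k in delta:
--             d = delta[k]
--             if d > 0:
--                 common[k] = v - d
--                 uniquea[k] = d
--             else:
--                 common[k] = v
--         elif v != 0:
--             uniquea[k] = v
--     for k, v in dict2.items():
--         if k in delta:
--             d = delta[k]
--             if d < 0:
--                 uniqueb[k] = -d
--         elif v != 0: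
--             uniqueb[k] = v
--     return common, uniquea, uniqueb
-- ===== Notes on version B (the rewrite author's own statement) =====
-- stated objective: alternative
-- what changed: Replaces the min/subtract/remove-zeroes pipeline with a signed-surplus formulation: a precomputed delta[k]=dict1[k]-dict2[k] table on shared keys replaces both the keywise min and the zero-removal passes, common/uniquea/uniqueb are read off the sign of the surplus (common = dict1[k] minus the positive surplus, uniquea = positive surplus, uniqueb = negated negative surplus), and no min-comparison or post-hoc zero filtering occurs.
import Mathlib
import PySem

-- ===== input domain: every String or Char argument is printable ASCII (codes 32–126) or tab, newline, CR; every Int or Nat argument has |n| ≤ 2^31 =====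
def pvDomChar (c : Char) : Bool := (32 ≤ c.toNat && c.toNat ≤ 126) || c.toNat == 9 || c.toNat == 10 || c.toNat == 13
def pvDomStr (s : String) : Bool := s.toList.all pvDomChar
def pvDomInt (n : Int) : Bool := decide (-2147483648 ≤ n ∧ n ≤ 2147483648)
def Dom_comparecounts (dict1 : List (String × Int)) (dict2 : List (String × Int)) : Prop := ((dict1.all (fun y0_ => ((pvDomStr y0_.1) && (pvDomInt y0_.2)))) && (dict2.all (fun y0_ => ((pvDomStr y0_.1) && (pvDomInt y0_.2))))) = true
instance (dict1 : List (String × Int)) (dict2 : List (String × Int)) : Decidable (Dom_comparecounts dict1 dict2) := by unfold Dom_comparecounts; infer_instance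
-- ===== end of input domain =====

-- B replaces A's min/subtract/remove-zeroes pipeline with a signed-surplus table
-- delta[k]=dict1[k]-dict2[k]: outputs are read off the sign of the surplus; objective: alternative.


-- ===== PORT A =====
-- {key: dict1[key] if dict1[key] <= dict2[key] else dict2[key] for key in dict1 if key in dict2}
-- (kv.2 is dict1[key]; getD 0 stands for dict2[key], exact because the filter guarantees the key is present)
def pvCommonA (dict1 dict2 : List (String × Int)) : PySem.Dict String Int :=
  (dict1.filter (fun kv => (PySem.Dict.mk dict2).contains kv.1)).foldl
    (fun d kv =>
      d.insert kv.1
        (if kv.2 ≤ (PySem.Dict.mk dict2).getD kv.1 0 then kv.2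
         else (PySem.Dict.mk dict2).getD kv.1 0))
    PySem.Dict.empty

-- comp_dict: {key: sample[key] - common[key] if key in common else sample[key] for key in sample}
def pvCompDictA (sample : List (String × Int)) (common : PySem.Dict String Int) : PySem.Dict String Int :=
  sample.foldl
    (fun d kv =>
      d.insert kv.1
        (match common.get? kv.1 with
         | some c => kv.2 - c
         | none => kv.2))
    PySem.Dict.empty

-- remove_zeroes: {key: d[key] for key in d if d[key] != 0}
def pvRemoveZeroesA (d : PySem.Dict String Int) : PySem.Dict String Int :=
  (d.items.filter (fun kv => kv.2 ≠ 0)).foldl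
    (fun acc kv => acc.insert kv.1 kv.2) PySem.Dict.empty

def comparecounts (dict1 : List (String × Int)) (dict2 : List (String × Int)) : (List (String × Int)) × (List (String × Int)) × (List (String × Int)) :=
  let common := pvCommonA dict1 dict2
  let uniquea := pvRemoveZeroesA (pvCompDictA dict1 common)
  let uniqueb := pvRemoveZeroesA (pvCompDictA dict2 common)
  (common.items, uniquea.items, uniqueb.items)

-- ===== PORT B =====
-- delta = {k: v - dict2[k] for k, v in dict1.items() if k in dict2}
-- (getD 0 stands for dict2[k], exact because the filter guarantees the key is present)
def pvDeltaB (dict1 dict2 : List (String × Int)) : PySem.Dict String Int :=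
  (dict1.filter (fun kv => (PySem.Dict.mk dict2).contains kv.1)).foldl
    (fun d kv => d.insert kv.1 (kv.2 - (PySem.Dict.mk dict2).getD kv.1 0))
    PySem.Dict.empty

-- first loop of Source B: over dict1, building common and uniquea from the surplus
def pvBLoop1 (delta : PySem.Dict String Int) : List (String × Int) → List (String × Int) × List (String × Int)
  | [] => ([], [])
  | (k, v) :: rest =>
    let p := pvBLoop1 delta rest
    match delta.get? k with
    | some d =>
      if d > 0 then ((k, v - d) :: p.1, (k, d) :: p.2)
      else ((k, v) :: p.1, p.2)
    | none => (p.1, if v ≠ 0 then (k, v) :: p.2 else p.2)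

-- second loop of Source B: over dict2, building uniqueb from the surplus
def pvBLoop2 (delta : PySem.Dict String Int) : List (String × Int) → List (String × Int)
  | [] => []
  | (k, v) :: rest =>
    let r := pvBLoop2 delta rest
    match delta.get? k with
    | some d => if d < 0 then (k, -d) :: r else r
    | none => if v ≠ 0 then (k, v) :: r else r

def comparecounts_alt (dict1 : List (String × Int)) (dict2 : List (String × Int)) : (List (String × Int)) × (List (String × Int)) × (List (String × Int)) :=
  let delta := pvDeltaB dict1 dict2
  let p := pvBLoop1 delta dict1
  (p.1, p.2, pvBLoop2 delta dict2)

-- ===== PRECONDITION & SPEC =====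
-- The arguments stand for Python dicts, whose keys are necessarily distinct; Pre_ excludes
-- association lists with duplicate keys, on which the dict reading of the input is ambiguous.
def Pre_comparecounts (dict1 : List (String × Int)) (dict2 : List (String × Int)) : Prop :=
  (dict1.map Prod.fst).Nodup ∧ (dict2.map Prod.fst).Nodup
instance (dict1 : List (String × Int)) (dict2 : List (String × Int)) : Decidable (Pre_comparecounts dict1 dict2) := by unfold Pre_comparecounts; infer_instance

def pvWitness_comparecounts : (List (String × Int)) × (List (String × Int)) :=
  ([("a", 2), ("b", 0), ("c", -1)], [("b", 3), ("c", -1), ("d", 4)])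

def Spec_comparecounts (dict1 : List (String × Int)) (dict2 : List (String × Int)) (out : (List (String × Int)) × (List (String × Int)) × (List (String × Int))) : Prop := out = comparecounts_alt dict1 dict2
instance (dict1 : List (String × Int)) (dict2 : List (String × Int)) (out : (List (String × Int)) × (List (String × Int)) × (List (String × Int))) : Decidable (Spec_comparecounts dict1 dict2 out) := by unfold Spec_comparecounts; infer_instance

-- ===== CLAIM (what is proved, stated in full; the proofs are below) =====
def Claim_equal_comparecounts : Prop := ∀ (dict1 : List (String × Int)) (dict2 : List (String × Int)), Dom_comparecounts dict1 dict2 → Pre_comparecounts dict1 dict2 → Spec_comparecounts dict1 dict2 (comparecounts dict1 dict2)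

-- ===== LEMMAS AND PROOFS =====

-- proof-only helpers
def pvP (dict2 : List (String × Int)) : String × Int → Bool :=
  fun kv => (PySem.Dict.mk dict2).contains kv.1

def pvF (dict2 : List (String × Int)) : String × Int → String × Int :=
  fun kv => (kv.1, if kv.2 ≤ (PySem.Dict.mk dict2).getD kv.1 0 then kv.2 else (PySem.Dict.mk dict2).getD kv.1 0)

def pvG (c : PySem.Dict String Int) : String × Int → String × Int :=
  fun kv => (kv.1, match c.get? kv.1 with | some x => kv.2 - x | none => kv.2)

theorem pv_common_items (dict1 dict2 : List (String × Int))
    (h1 : (dict1.map Prod.fst).Nodup) :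
    (pvCommonA dict1 dict2).items = (dict1.filter (pvP dict2)).map (pvF dict2) := by
  have h := PySem.Dict.items_foldl_insert_fresh
      (dict1.filter (fun kv : String × Int => (PySem.Dict.mk dict2).contains kv.1)) Prod.fst
      (fun kv => if kv.2 ≤ (PySem.Dict.mk dict2).getD kv.1 0 then kv.2 else (PySem.Dict.mk dict2).getD kv.1 0)
      PySem.Dict.empty
      (fun _ _ => PySem.Dict.contains_empty _)
      (h1.sublist (List.filter_sublist.map Prod.fst))
  unfold pvCommonA
  refine h.trans ?_
  dsimp only [pvP, pvF, PySem.Dict.empty]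
  exact List.nil_append _

theorem pv_delta_items (dict1 dict2 : List (String × Int))
    (h1 : (dict1.map Prod.fst).Nodup) :
    (pvDeltaB dict1 dict2).items
      = (dict1.filter (pvP dict2)).map
          (fun kv => (kv.1, kv.2 - (PySem.Dict.mk dict2).getD kv.1 0)) := by
  have h := PySem.Dict.items_foldl_insert_fresh
      (dict1.filter (fun kv : String × Int => (PySem.Dict.mk dict2).contains kv.1)) Prod.fst
      (fun kv => kv.2 - (PySem.Dict.mk dict2).getD kv.1 0)
      PySem.Dict.empty
      (fun _ _ => PySem.Dict.contains_empty _)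
      (h1.sublist (List.filter_sublist.map Prod.fst))
  unfold pvDeltaB
  refine h.trans ?_
  dsimp only [pvP, PySem.Dict.empty]
  exact List.nil_append _

theorem pv_compdict_items (sample : List (String × Int)) (c : PySem.Dict String Int)
    (h : (sample.map Prod.fst).Nodup) :
    (pvCompDictA sample c).items = sample.map (pvG c) := by
  have hh := PySem.Dict.items_foldl_insert_fresh
      sample Prod.fst
      (fun kv : String × Int => match c.get? kv.1 with | some x => kv.2 - x | none => kv.2)
      PySem.Dict.empty
      (fun _ _ => PySem.Dict.contains_empty _) h
  unfold pvCompDictA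
  refine hh.trans ?_
  dsimp only [pvG, PySem.Dict.empty]
  exact List.nil_append _

theorem pv_removezeroes_items (d : PySem.Dict String Int)
    (h : (d.items.map Prod.fst).Nodup) :
    (pvRemoveZeroesA d).items = d.items.filter (fun kv => kv.2 ≠ 0) := by
  have hh := PySem.Dict.items_foldl_insert_fresh
      (d.items.filter (fun kv => kv.2 ≠ 0)) Prod.fst Prod.snd
      PySem.Dict.empty
      (fun _ _ => PySem.Dict.contains_empty _)
      (h.sublist (List.filter_sublist.map Prod.fst))
  unfold pvRemoveZeroesA
  refine hh.trans ?_
  dsimp only [PySem.Dict.empty]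
  simp

theorem pv_common_keys_nodup (dict1 dict2 : List (String × Int))
    (h1 : (dict1.map Prod.fst).Nodup) :
    (pvCommonA dict1 dict2).keys.Nodup := by
  have h := pv_common_items dict1 dict2 h1
  have hk : (pvCommonA dict1 dict2).keys = ((dict1.filter (pvP dict2)).map (pvF dict2)).map Prod.fst := by
    simp only [PySem.Dict.keys, h]
  rw [hk]
  have hfst : ((dict1.filter (pvP dict2)).map (pvF dict2)).map Prod.fst
      = (dict1.filter (pvP dict2)).map Prod.fst := by
    simp [pvF, Function.comp]
  rw [hfst]
  exact h1.sublist (List.filter_sublist.map Prod.fst)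

theorem pv_delta_keys_nodup (dict1 dict2 : List (String × Int))
    (h1 : (dict1.map Prod.fst).Nodup) :
    (pvDeltaB dict1 dict2).keys.Nodup := by
  have h := pv_delta_items dict1 dict2 h1
  have hk : (pvDeltaB dict1 dict2).keys
      = ((dict1.filter (pvP dict2)).map (fun kv => (kv.1, kv.2 - (PySem.Dict.mk dict2).getD kv.1 0))).map Prod.fst := by
    simp only [PySem.Dict.keys, h]
  rw [hk]
  have hfst : ((dict1.filter (pvP dict2)).map (fun kv : String × Int => (kv.1, kv.2 - (PySem.Dict.mk dict2).getD kv.1 0))).map Prod.fst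
      = (dict1.filter (pvP dict2)).map Prod.fst := by
    simp [Function.comp]
  rw [hfst]
  exact h1.sublist (List.filter_sublist.map Prod.fst)

theorem pv_get?_common (dict1 dict2 : List (String × Int)) (k : String) (v : Int)
    (h1 : (dict1.map Prod.fst).Nodup) (hmem : (k, v) ∈ dict1) :
    (pvCommonA dict1 dict2).get? k
      = ((PySem.Dict.mk dict2).get? k).map (fun w => if v ≤ w then v else w) := by
  have hitems := pv_common_items dict1 dict2 h1
  cases hw : (PySem.Dict.mk dict2).get? k with
  | none =>
    simp only [Option.map_none]
    rw [PySem.Dict.get?_eq_none_iff_not_mem_keys]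
    simp only [PySem.Dict.keys, hitems]
    intro hmemk
    rcases List.mem_map.mp hmemk with ⟨p, hp, hfst⟩
    rcases List.mem_map.mp hp with ⟨kv, hkv, hpk⟩
    have hkvf := List.of_mem_filter hkv
    simp only [pvP] at hkvf
    have hk1 : kv.1 = k := by
      have hp1 : p.1 = kv.1 := by rw [← hpk]; rfl
      rw [← hfst, hp1]
    rw [hk1, PySem.Dict.contains_eq_isSome_get?, hw] at hkvf
    simp at hkvf
  | some w =>
    simp only [Option.map_some]
    apply PySem.Dict.get?_of_mem_items _ _ (pv_common_keys_nodup dict1 dict2 h1)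
    rw [hitems]
    apply List.mem_map.mpr
    refine ⟨(k, v), ?_, ?_⟩
    · apply List.mem_filter.mpr
      refine ⟨hmem, ?_⟩
      simp [pvP, PySem.Dict.contains_eq_isSome_get?, hw]
    · simp [pvF, PySem.Dict.getD_of_get?_eq_some _ _ hw]

theorem pv_get?_delta (dict1 dict2 : List (String × Int)) (k : String) (v : Int)
    (h1 : (dict1.map Prod.fst).Nodup) (hmem : (k, v) ∈ dict1) :
    (pvDeltaB dict1 dict2).get? k
      = ((PySem.Dict.mk dict2).get? k).map (fun w => v - w) := by
  have hitems := pv_delta_items dict1 dict2 h1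
  cases hw : (PySem.Dict.mk dict2).get? k with
  | none =>
    simp only [Option.map_none]
    rw [PySem.Dict.get?_eq_none_iff_not_mem_keys]
    simp only [PySem.Dict.keys, hitems]
    intro hmemk
    rcases List.mem_map.mp hmemk with ⟨p, hp, hfst⟩
    rcases List.mem_map.mp hp with ⟨kv, hkv, hpk⟩
    have hkvf := List.of_mem_filter hkv
    simp only [pvP] at hkvf
    have hk1 : kv.1 = k := by
      have hp1 : p.1 = kv.1 := by rw [← hpk]
      rw [← hfst, hp1]
    rw [hk1, PySem.Dict.contains_eq_isSome_get?, hw] at hkvf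
    simp at hkvf
  | some w =>
    simp only [Option.map_some]
    apply PySem.Dict.get?_of_mem_items _ _ (pv_delta_keys_nodup dict1 dict2 h1)
    rw [hitems]
    have hgd : (PySem.Dict.mk dict2).getD k 0 = w := PySem.Dict.getD_of_get?_eq_some _ _ hw
    exact List.mem_map.mpr ⟨(k, v),
      List.mem_filter.mpr ⟨hmem, by simp [pvP, PySem.Dict.contains_eq_isSome_get?, hw]⟩,
      by simp [hgd]⟩

theorem pv_bloop1_eq (dict1 dict2 : List (String × Int))
    (h1 : (dict1.map Prod.fst).Nodup) :
    ∀ l : List (String × Int), (∀ kv ∈ l, kv ∈ dict1) →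
      pvBLoop1 (pvDeltaB dict1 dict2) l
        = ((l.filter (pvP dict2)).map (pvF dict2),
           (l.map (pvG (pvCommonA dict1 dict2))).filter (fun kv => kv.2 ≠ 0)) := by
  intro l
  induction l with
  | nil => intro _; rfl
  | cons kv rest ih =>
    intro hsub
    obtain ⟨k, v⟩ := kv
    have hhead : (k, v) ∈ dict1 := hsub _ (List.mem_cons_self ..)
    have ihr := ih (fun x hx => hsub x (List.mem_cons_of_mem _ hx))
    have hc := pv_get?_common dict1 dict2 k v h1 hhead
    have hd := pv_get?_delta dict1 dict2 k v h1 hhead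
    cases hw : (PySem.Dict.mk dict2).get? k with
    | some w =>
      rw [hw] at hc hd
      simp only [Option.map_some] at hc hd
      simp only [pvBLoop1, hd, ihr]
      refine Prod.ext ?_ ?_
      · by_cases hpos : w < v
        · have hnle : ¬ v ≤ w := by omega
          have hval : v - (v - w) = w := by ring
          simp [hpos, hval, pvP, pvF, PySem.Dict.contains_eq_isSome_get?, hw,
            PySem.Dict.getD_of_get?_eq_some _ _ hw, hnle]
        · have hle : v ≤ w := by omega
          simp [hpos, pvP, pvF, PySem.Dict.contains_eq_isSome_get?, hw,
            PySem.Dict.getD_of_get?_eq_some _ _ hw, hle]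
      · simp only [List.map_cons, List.filter_cons, pvG, hc]
        by_cases hpos : w < v
        · have hnle : ¬ v ≤ w := by omega
          have hne : v - w ≠ 0 := by omega
          simp [hpos, hnle, hne]
        · have hle : v ≤ w := by omega
          simp [hpos, hle]
    | none =>
      rw [hw] at hc hd
      simp only [Option.map_none] at hc hd
      simp only [pvBLoop1, hd, ihr]
      refine Prod.ext ?_ ?_
      · simp [pvP, PySem.Dict.contains_eq_isSome_get?, hw]
      · simp only [List.map_cons, List.filter_cons, pvG, hc]
        by_cases hz : v = 0 <;> simp [hz]

theorem pv_bloop2_eq (dict1 dict2 : List (String × Int))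
    (h1 : (dict1.map Prod.fst).Nodup) (h2 : (dict2.map Prod.fst).Nodup) :
    ∀ l : List (String × Int), (∀ kv ∈ l, kv ∈ dict2) →
      pvBLoop2 (pvDeltaB dict1 dict2) l
        = (l.map (pvG (pvCommonA dict1 dict2))).filter (fun kv => kv.2 ≠ 0) := by
  intro l
  induction l with
  | nil => intro _; rfl
  | cons kv rest ih =>
    intro hsub
    obtain ⟨k, v⟩ := kv
    have hhead : (k, v) ∈ dict2 := hsub _ (List.mem_cons_self ..)
    have ihr := ih (fun x hx => hsub x (List.mem_cons_of_mem _ hx))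
    have hv2 : (PySem.Dict.mk dict2).get? k = some v := by
      apply PySem.Dict.get?_of_mem_items
      · exact hhead
      · simpa [PySem.Dict.keys] using h2
    cases hw1 : (PySem.Dict.mk dict1).get? k with
    | none =>
      have hk1 : k ∉ dict1.map Prod.fst := by
        have := (PySem.Dict.get?_eq_none_iff_not_mem_keys (PySem.Dict.mk dict1) k).mp hw1
        simpa [PySem.Dict.keys] using this
      have hdel : (pvDeltaB dict1 dict2).get? k = none := by
        rw [PySem.Dict.get?_eq_none_iff_not_mem_keys]
        simp only [PySem.Dict.keys, pv_delta_items dict1 dict2 h1]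
        intro hmemk
        rcases List.mem_map.mp hmemk with ⟨p, hp, hfst⟩
        rcases List.mem_map.mp hp with ⟨q, hq, hqp⟩
        have hq1 : q.1 = k := by
          have : p.1 = q.1 := by rw [← hqp]
          rw [← hfst, this]
        exact hk1 (List.mem_map.mpr ⟨q, List.mem_of_mem_filter hq, hq1⟩)
      have hcom : (pvCommonA dict1 dict2).get? k = none := by
        rw [PySem.Dict.get?_eq_none_iff_not_mem_keys]
        simp only [PySem.Dict.keys, pv_common_items dict1 dict2 h1]
        intro hmemk
        rcases List.mem_map.mp hmemk with ⟨p, hp, hfst⟩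
        rcases List.mem_map.mp hp with ⟨q, hq, hqp⟩
        have hq1 : q.1 = k := by
          have : p.1 = q.1 := by rw [← hqp]; rfl
          rw [← hfst, this]
        exact hk1 (List.mem_map.mpr ⟨q, List.mem_of_mem_filter hq, hq1⟩)
      simp only [pvBLoop2, hdel, ihr, List.map_cons, List.filter_cons, pvG, hcom]
      by_cases hz : v = 0 <;> simp [hz]
    | some v1 =>
      have hmem1 : (k, v1) ∈ dict1 := PySem.Dict.mem_items_of_get?_eq_some _ hw1
      have hdel := pv_get?_delta dict1 dict2 k v1 h1 hmem1
      have hcom := pv_get?_common dict1 dict2 k v1 h1 hmem1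
      rw [hv2] at hdel hcom
      simp only [Option.map_some] at hdel hcom
      simp only [pvBLoop2, hdel, ihr, List.map_cons, List.filter_cons, pvG, hcom]
      by_cases hlt : v1 - v < 0
      · have hle : v1 ≤ v := by omega
        have hne : v - v1 ≠ 0 := by omega
        have hval : -(v1 - v) = v - v1 := by ring
        simp [hlt, hle, hne, hval]
      · by_cases hle : v1 ≤ v
        · have hvv : v - v1 = 0 := by omega
          simp [hlt, hle, hvv]
        · simp [hlt, hle]

theorem comparecounts_spec : Claim_equal_comparecounts := by
  intro dict1 dict2 _ hpre
  obtain ⟨h1, h2⟩ := hpre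
  unfold Spec_comparecounts comparecounts comparecounts_alt
  dsimp only
  have hcommon := pv_common_items dict1 dict2 h1
  have hloop1 := pv_bloop1_eq dict1 dict2 h1 dict1 (fun _ h => h)
  have hloop2 := pv_bloop2_eq dict1 dict2 h1 h2 dict2 (fun _ h => h)
  have hcd1 := pv_compdict_items dict1 (pvCommonA dict1 dict2) h1
  have hcd2 := pv_compdict_items dict2 (pvCommonA dict1 dict2) h2
  have hn1 : ((pvCompDictA dict1 (pvCommonA dict1 dict2)).items.map Prod.fst).Nodup := by
    rw [hcd1]
    have hfst : (dict1.map (pvG (pvCommonA dict1 dict2))).map Prod.fst = dict1.map Prod.fst := by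
      simp [pvG, Function.comp]
    rw [hfst]; exact h1
  have hn2 : ((pvCompDictA dict2 (pvCommonA dict1 dict2)).items.map Prod.fst).Nodup := by
    rw [hcd2]
    have hfst : (dict2.map (pvG (pvCommonA dict1 dict2))).map Prod.fst = dict2.map Prod.fst := by
      simp [pvG, Function.comp]
    rw [hfst]; exact h2
  have hua := pv_removezeroes_items _ hn1
  have hub := pv_removezeroes_items _ hn2
  refine Prod.ext ?_ (Prod.ext ?_ ?_)
  · rw [hcommon, hloop1]
  · rw [hua, hcd1, hloop1]
  · rw [hub, hcd2, hloop2]
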